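-- pv_equiv track=rewrite | github.com/JohnPetros/leetcode | fatec/interfatec/2025/fase-2/cabecadeovo.py | encontrar_senha
-- ===== SOURCE A (Python) =====
-- def soma_dos_digitos(n_str):
--     """
--     Calcula a soma dos dígitos a partir de uma string.
--     É um pouco mais rápido não converter para string toda vez.
--     """
--     soma = 0
--     for digito in n_str:
--         soma += int(digito)
--     return soma
--
-- def encontrar_senha(A, B):
--     maior_soma = -1
--     senha_resultado = 0
--
--     # O loop principal
--     # range(A, B + 1) irá iterar 10 milhões de vezes
--     for numero in range(A, B + 1):
--         # Esta operação é muito rápida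
--         soma_atual = soma_dos_digitos(str(numero))
--
--         # Esta é uma simples comparação de inteiros
--         if soma_atual > maior_soma:
--             maior_soma = soma_atual
--             senha_resultado = numero
--
--     return senha_resultado, maior_soma
-- ===== SOURCE B (Python) =====
-- def _digit_sum(n):
--     s = 0
--     while n > 0:
--         s += n % 10
--         n //= 10
--     return s
--
--
-- def encontrar_senha(A, B):
--     # Digit/candidate method: on [A, B] the maximal digit sum is attained only at B
--     # itself or at a number obtained from B by decrementing one decimal digit and
--     # filling all lower digits with 9, so only those O(D) candidates are examined
--     # (pick max digit sum, ties broken by the smaller candidate).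
--     if B < A:
--         return 0, -1
--     candidates = [B]
--     n, mult = B, 1
--     while n > 0:
--         if n % 10 > 0:
--             candidates.append((n - 1) * mult + (mult - 1))
--         n //= 10
--         mult *= 10
--     best_num, best_sum = 0, -1
--     for c in candidates:
--         if c >= A:
--             s = _digit_sum(c)
--             if s > best_sum or (s == best_sum and c < best_num):
--                 best_num, best_sum = c, s
--     return best_num, best_sum
-- ===== Notes on version B (the rewrite author's own statement) =====
-- stated objective: faster
-- what changed: B replaces A's scan of every number in [A,B] by the digit-candidate method: only B and the O(D) numbers obtained from B by decrementing one decimal digit and filling the lower digits with 9 can attain the maximal digit sum, so B examines just those candidates (max digit sum, ties to the smaller candidate); Pre_ excludes ranges containing negative numbers, on which A raises ValueError (int('-')).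
import Mathlib
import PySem

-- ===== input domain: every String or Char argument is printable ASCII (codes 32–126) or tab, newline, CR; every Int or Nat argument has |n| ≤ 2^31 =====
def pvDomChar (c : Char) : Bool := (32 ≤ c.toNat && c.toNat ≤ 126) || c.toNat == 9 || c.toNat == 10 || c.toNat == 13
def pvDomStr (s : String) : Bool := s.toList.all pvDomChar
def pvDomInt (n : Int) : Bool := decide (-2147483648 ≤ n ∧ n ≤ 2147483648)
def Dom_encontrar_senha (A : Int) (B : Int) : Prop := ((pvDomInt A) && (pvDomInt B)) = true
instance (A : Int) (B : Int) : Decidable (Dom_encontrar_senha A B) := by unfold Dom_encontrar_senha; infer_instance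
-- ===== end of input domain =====

-- B replaces A's scan of the whole range by the digit-candidate method: it examines only B
-- and the numbers obtained from B by decrementing one decimal digit and filling the lower
-- digits with 9 (O(D^2) instead of O((B-A)·D)); same return value.

-- ===== PORT A =====
-- int(digito): raises ValueError on a non-digit character; inside Pre_ every scanned
-- number is ≥ 0 so every character is a digit and the `.getD 0` default is never used.
def soma_dos_digitos (n_str : String) : Int :=
  n_str.toList.foldl (fun soma digito => soma + (PySem.Int.ofChars? [digito]).getD 0) 0

def encontrar_senha (A : Int) (B : Int) : Int × Int :=
  -- loop state: (maior_soma, senha_resultado), initially (-1, 0)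
  let st := (PySem.List.pyRange A (B + 1) 1).foldl
      (fun (st : Int × Int) numero =>
        let soma_atual := soma_dos_digitos (PySem.Int.toStr numero)
        if soma_atual > st.1 then (soma_atual, numero) else st)
      (-1, 0)
  (st.2, st.1)

-- ===== PORT B =====
-- `while n > 0: s += n % 10; n //= 10` of Source B's _digit_sum
def digitSumLoop (n : Int) (s : Int) : Int :=
  if h : 0 < n then digitSumLoop (PySem.Int.floordiv n 10) (s + PySem.Int.mod n 10) else s
termination_by n.toNat
decreasing_by
  rw [PySem.Int.floordiv_eq_ediv_of_pos (by norm_num)]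
  omega

def digit_sum (n : Int) : Int := digitSumLoop n 0

-- `while n > 0` loop of Source B that appends the decrement-and-9-fill candidates
def candLoop (n : Int) (mult : Int) (acc : List Int) : List Int :=
  if h : 0 < n then
    candLoop (PySem.Int.floordiv n 10) (mult * 10)
      (if PySem.Int.mod n 10 > 0 then acc ++ [(n - 1) * mult + (mult - 1)] else acc)
  else acc
termination_by n.toNat
decreasing_by
  rw [PySem.Int.floordiv_eq_ediv_of_pos (by norm_num)]
  omega

-- body of Source B's `for c in candidates` selection loop, state (best_num, best_sum)
def selStep (A : Int) (st : Int × Int) (c : Int) : Int × Int :=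
  if A ≤ c then
    let s := digit_sum c
    if s > st.2 ∨ (s = st.2 ∧ c < st.1) then (c, s) else st
  else st

def encontrar_senha_alt (A : Int) (B : Int) : Int × Int :=
  if B < A then (0, -1)
  else (candLoop B 1 [B]).foldl (selStep A) (0, -1)

-- ===== PRECONDITION & SPEC =====
-- Pre_ excludes exactly the inputs where the scanned range [A, B] contains a negative
-- number: there A raises ValueError (int('-') on the minus sign of str(numero)).
def Pre_encontrar_senha (A : Int) (B : Int) : Prop := 0 ≤ A ∨ B < A
instance (A : Int) (B : Int) : Decidable (Pre_encontrar_senha A B) := by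
  unfold Pre_encontrar_senha; infer_instance

def pvWitness_encontrar_senha : Int × Int := (3, 7)

def Spec_encontrar_senha (A : Int) (B : Int) (out : Int × Int) : Prop := out = encontrar_senha_alt A B
instance (A : Int) (B : Int) (out : Int × Int) : Decidable (Spec_encontrar_senha A B out) := by
  unfold Spec_encontrar_senha; infer_instance

-- ===== CLAIM (what is proved, stated in full; the proofs are below) =====
def Claim_equal_encontrar_senha : Prop := ∀ (A : Int) (B : Int), Dom_encontrar_senha A B → Pre_encontrar_senha A B → Spec_encontrar_senha A B (encontrar_senha A B)

-- ===== LEMMAS AND PROOFS =====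

-- arithmetic digit sum (reference function for both sides)
def sdig (n : Int) : Int :=
  if h : 0 < n then n % 10 + sdig (n / 10) else 0
termination_by n.toNat
decreasing_by omega

theorem sdig_nonneg (n : Int) : 0 ≤ sdig n := by
  fun_induction sdig n with
  | case1 n h ih => omega
  | case2 n h => norm_num

theorem sdig_natCast (m : Nat) :
    sdig (m : Int) = if 0 < m then ((m % 10 : Nat) : Int) + sdig ((m / 10 : Nat) : Int) else 0 := by
  rw [sdig]
  by_cases h : 0 < m
  · rw [dif_pos (by exact_mod_cast h), if_pos h]
    push_cast
    rfl
  · rw [dif_neg (by exact_mod_cast h), if_neg h]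

theorem sdig_split (a d : Int) (ha : 0 ≤ a) (hd0 : 0 ≤ d) (hd9 : d < 10) :
    sdig (a * 10 + d) = sdig a + d := by
  by_cases h : 0 < a * 10 + d
  · rw [sdig, dif_pos h]
    have hmod : (a * 10 + d) % 10 = d := by omega
    have hdiv : (a * 10 + d) / 10 = a := by omega
    rw [hmod, hdiv]
    ring
  · have ha0 : a = 0 ∧ d = 0 := by omega
    obtain ⟨rfl, rfl⟩ := ha0
    have h0 : sdig 0 = 0 := by rw [sdig]; norm_num
    norm_num [h0]

-- value of one character as A computes it
def chv (c : Char) : Int := (PySem.Int.ofChars? [c]).getD 0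

theorem chv_digitChar (r : Nat) (hr : r < 10) : chv (Nat.digitChar r) = (r : Int) := by
  interval_cases r <;> decide

theorem foldl_add_chv (l : List Char) (s0 : Int) :
    l.foldl (fun soma digito => soma + (PySem.Int.ofChars? [digito]).getD 0) s0
      = s0 + (l.map chv).sum := by
  induction l generalizing s0 with
  | nil => simp
  | cons c t ih => simp [ih, chv, add_assoc]

theorem toDigitsCore_sum (f : Nat) :
    ∀ (m : Nat) (acc : List Char), m < 10 ^ f →
      ((Nat.toDigitsCore 10 f m acc).map chv).sum = sdig (m : Int) + (acc.map chv).sum := by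
  induction f with
  | zero =>
    intro m acc hm
    interval_cases m
    rw [sdig_natCast]
    simp [Nat.toDigitsCore]
  | succ f ih =>
    intro m acc hm
    simp only [Nat.toDigitsCore]
    have hmod : m % 10 < 10 := Nat.mod_lt _ (by norm_num)
    by_cases h0 : m / 10 = 0
    · rw [if_pos h0]
      simp only [List.map_cons, List.sum_cons, chv_digitChar (m % 10) hmod]
      rw [sdig_natCast]
      by_cases hm0 : 0 < m
      · rw [if_pos hm0, h0]
        rw [sdig_natCast]
        norm_num
      · have : m = 0 := by omega
        subst this
        norm_num
    · rw [if_neg h0]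
      have hlt : m / 10 < 10 ^ f := by
        have : m < 10 ^ f * 10 := by
          rw [← pow_succ]; exact hm
        exact Nat.div_lt_of_lt_mul (by omega)
      rw [ih (m / 10) _ hlt]
      simp only [List.map_cons, List.sum_cons, chv_digitChar (m % 10) hmod]
      rw [sdig_natCast (m := m), if_pos (by omega : 0 < m)]
      ring

theorem soma_str_eq (n : Int) (hn : 0 ≤ n) :
    soma_dos_digitos (PySem.Int.toStr n) = sdig n := by
  unfold soma_dos_digitos
  rw [PySem.Int.toList_toStr]
  have hneg : ¬ n < 0 := by omega
  simp only [PySem.Int.toChars, if_neg hneg]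
  rw [foldl_add_chv]
  have hb : n.toNat < 10 ^ (n.toNat + 1) := by
    calc n.toNat < 10 ^ n.toNat := Nat.lt_pow_self (by norm_num)
    _ ≤ 10 ^ (n.toNat + 1) := Nat.pow_le_pow_right (by norm_num) (Nat.le_succ _)
  rw [Nat.toDigits, toDigitsCore_sum _ _ _ hb]
  simp [Int.toNat_of_nonneg hn]

-- reference result (senha, soma) for the range a..b, computed by peeling b
def specD (a : Int) (b : Int) : Int × Int :=
  if h : b < a then (0, -1)
  else
    let p := specD a (b - 1)
    if sdig b > p.2 then (b, sdig b) else p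
termination_by (b + 1 - a).toNat
decreasing_by omega

-- A's fold over the range a..b equals specD (with the pair swapped)
theorem fold_eq_specD (a : Int) (ha : 0 ≤ a) (b : Int) :
    (PySem.List.pyRange a (b + 1) 1).foldl
      (fun (st : Int × Int) numero =>
        let soma_atual := soma_dos_digitos (PySem.Int.toStr numero)
        if soma_atual > st.1 then (soma_atual, numero) else st)
      (-1, 0) = ((specD a b).2, (specD a b).1) := by
  by_cases hb : b < a
  · rw [PySem.List.pyRange_one_eq_nil (by omega)]
    rw [specD, dif_pos hb]
    simp
  · have key : ∀ k : Nat,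
      (PySem.List.pyRange a (a + k + 1) 1).foldl
        (fun (st : Int × Int) numero =>
          let soma_atual := soma_dos_digitos (PySem.Int.toStr numero)
          if soma_atual > st.1 then (soma_atual, numero) else st)
        (-1, 0) = ((specD a (a + k)).2, (specD a (a + k)).1) := by
      intro k
      induction k with
      | zero =>
        simp only [Nat.cast_zero, add_zero]
        rw [PySem.List.pyRange_one_singleton]
        simp only [List.foldl_cons, List.foldl_nil]
        rw [soma_str_eq a ha]
        rw [specD, dif_neg (by omega)]
        rw [specD, dif_pos (by omega)]
        have h0 : 0 ≤ sdig a := sdig_nonneg a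
        simp only []
        rw [if_pos (by norm_num; omega), if_pos (by norm_num; omega)]
      | succ k ih =>
        have hsplit : a + ((k:Int) + 1) + 1 = (a + (k:Int) + 1) + 1 := by ring
        push_cast
        rw [hsplit, PySem.List.pyRange_one_succ_right (by omega)]
        rw [List.foldl_append, ih]
        simp only [List.foldl_cons, List.foldl_nil]
        rw [soma_str_eq (a + (k:Int) + 1) (by omega)]
        conv_rhs => rw [specD, dif_neg (by omega)]
        have harg : a + ((k:Int) + 1) - 1 = a + (k:Int) := by ring
        simp only [harg]
        have harg2 : a + ((k:Int) + 1) = a + (k:Int) + 1 := by ring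
        simp only [harg2]
        by_cases hgt : sdig (a + (k:Int) + 1) > (specD a (a + (k:Int))).2
        · rw [if_pos hgt, if_pos hgt]
        · rw [if_neg hgt, if_neg hgt]
    obtain ⟨k, rfl⟩ : ∃ k : Nat, b = a + k := ⟨(b - a).toNat, by omega⟩
    exact key k

-- Source B's digit-sum loop computes sdig
theorem digitSumLoop_eq : ∀ (n s : Int), digitSumLoop n s = s + sdig n := by
  intro n s
  fun_induction digitSumLoop n s with
  | case1 n s h ih =>
    rw [ih]
    rw [PySem.Int.floordiv_eq_ediv_of_pos (by norm_num), PySem.Int.mod_eq_emod_of_pos (by norm_num)]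
    conv_rhs => rw [sdig, dif_pos h]
    ring
  | case2 n s h =>
    rw [sdig, dif_neg h]
    ring

theorem digit_sum_eq (n : Int) : digit_sum n = sdig n := by
  unfold digit_sum
  rw [digitSumLoop_eq]
  ring

-- reference candidate list: B with one digit decremented and the lower digits set to 9
def candsSpec (n : Int) : List Int :=
  if h : 0 < n then
    (if n % 10 > 0 then [n - 1] else []) ++ (candsSpec (n / 10)).map (fun c => c * 10 + 9)
  else []
termination_by n.toNat
decreasing_by omega

theorem candLoop_eq : ∀ (n mult : Int) (acc : List Int),
    candLoop n mult acc = acc ++ (candsSpec n).map (fun c => c * mult + (mult - 1)) := by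
  intro n mult acc
  fun_induction candLoop n mult acc with
  | case1 n mult acc h ih =>
    simp only [dite_eq_ite] at ih
    rw [ih]
    rw [PySem.Int.floordiv_eq_ediv_of_pos (by norm_num), PySem.Int.mod_eq_emod_of_pos (by norm_num)]
    conv_rhs => rw [candsSpec, dif_pos h]
    have hmap : ((candsSpec (n / 10)).map (fun c => c * 10 + 9)).map (fun c => c * mult + (mult - 1))
        = (candsSpec (n / 10)).map (fun c => c * (mult * 10) + (mult * 10 - 1)) := by
      rw [List.map_map]
      apply List.map_congr_left
      intro c _
      simp [Function.comp]
      ring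
    by_cases hr : n % 10 > 0
    · rw [if_pos hr, if_pos hr]
      simp [hmap]
    · rw [if_neg hr, if_neg hr]
      simp [hmap]
  | case2 n mult acc h =>
    rw [candsSpec, dif_neg h]
    simp

theorem candsSpec_bounds : ∀ (n c : Int), c ∈ candsSpec n → 0 ≤ c ∧ c < n := by
  intro n
  fun_induction candsSpec n with
  | case1 n h ih =>
    intro c hc
    rcases List.mem_append.1 hc with h1 | h2
    · have hc1 : c = n - 1 := by
        by_cases hr : n % 10 > 0
        · rw [if_pos hr] at h1; simpa using h1
        · rw [if_neg hr] at h1; simp at h1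
      omega
    · obtain ⟨c', hc', rfl⟩ := List.mem_map.1 h2
      obtain ⟨hb1, hb2⟩ := ih c' hc'
      omega
  | case2 n h =>
    intro c hc
    simp at hc

-- core lemma of the candidate method: every z < n is dominated (in digit sum) by a
-- candidate ≥ z, with equality of digit sums only at the candidate itself
theorem cand_cover : ∀ (N : Nat) (n z : Int), n.toNat ≤ N → 0 ≤ z → z < n →
    ∃ c ∈ candsSpec n, z ≤ c ∧ sdig z ≤ sdig c ∧ (sdig z = sdig c → z = c) := by
  intro N
  induction N with
  | zero => intro n z hN hz hzn; omega
  | succ N ih =>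
    intro n z hN hz hzn
    have hn : 0 < n := by omega
    have hq : 0 ≤ n / 10 := by omega
    have hzq : 0 ≤ z / 10 := by omega
    have hzsplit : z = (z / 10) * 10 + z % 10 := by omega
    have hnsplit : n = (n / 10) * 10 + n % 10 := by omega
    have hzr : 0 ≤ z % 10 ∧ z % 10 < 10 := by omega
    have hnr : 0 ≤ n % 10 ∧ n % 10 < 10 := by omega
    have hle : z / 10 ≤ n / 10 := by omega
    have hsz : sdig z = sdig (z / 10) + z % 10 := by
      conv_lhs => rw [hzsplit]
      exact sdig_split _ _ hzq hzr.1 hzr.2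
    by_cases hcase : z / 10 = n / 10
    · have hrpos : 0 < n % 10 := by omega
      have hs1 : sdig (n - 1) = sdig (n / 10) + (n % 10 - 1) := by
        have hsplit1 : n - 1 = (n / 10) * 10 + (n % 10 - 1) := by omega
        rw [hsplit1]
        exact sdig_split _ _ hq (by omega) (by omega)
      refine ⟨n - 1, ?_, by omega, ?_, ?_⟩
      · rw [candsSpec, dif_pos hn]
        exact List.mem_append.2 (Or.inl (by rw [if_pos (by omega : n % 10 > 0)]; simp))
      · rw [hsz, hs1, hcase]; omega
      · intro heq
        rw [hsz, hs1, hcase] at heq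
        omega
    · have hlt : z / 10 < n / 10 := lt_of_le_of_ne hle hcase
      obtain ⟨c', hc'mem, hc'le, hc'sd, hc'eq⟩ := ih (n / 10) (z / 10) (by omega) hzq hlt
      have hc'0 : 0 ≤ c' := (candsSpec_bounds _ _ hc'mem).1
      have hsc : sdig (c' * 10 + 9) = sdig c' + 9 :=
        sdig_split _ _ hc'0 (by norm_num) (by norm_num)
      refine ⟨c' * 10 + 9, ?_, by omega, ?_, ?_⟩
      · rw [candsSpec, dif_pos hn]
        exact List.mem_append.2 (Or.inr (List.mem_map.2 ⟨c', hc'mem, rfl⟩))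
      · rw [hsz, hsc]; omega
      · intro heq
        rw [hsz, hsc] at heq
        have h9 : z % 10 = 9 ∧ sdig (z / 10) = sdig c' := by omega
        have := hc'eq h9.2
        omega

-- invariant of Source B's selection fold
theorem sel_spec (A : Int) : ∀ (cs : List Int) (st : Int × Int),
    (st.2 ≤ (cs.foldl (selStep A) st).2 ∧
      ((cs.foldl (selStep A) st).2 = st.2 → (cs.foldl (selStep A) st).1 ≤ st.1)) ∧
    (∀ c ∈ cs, A ≤ c → sdig c < (cs.foldl (selStep A) st).2 ∨
      (sdig c = (cs.foldl (selStep A) st).2 ∧ (cs.foldl (selStep A) st).1 ≤ c)) ∧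
    (cs.foldl (selStep A) st = st ∨
      (A ≤ (cs.foldl (selStep A) st).1 ∧
        (cs.foldl (selStep A) st).2 = sdig (cs.foldl (selStep A) st).1 ∧
        (cs.foldl (selStep A) st).1 ∈ cs)) := by
  intro cs
  induction cs with
  | nil =>
    intro st
    refine ⟨⟨le_refl _, fun _ => le_refl _⟩, ?_, Or.inl rfl⟩
    intro c hc
    simp at hc
  | cons c cs ih =>
    intro st
    simp only [List.foldl_cons]
    by_cases hAc : A ≤ c
    · by_cases hcond : digit_sum c > st.2 ∨ (digit_sum c = st.2 ∧ c < st.1)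
      · have hst' : selStep A st c = (c, sdig c) := by
          unfold selStep
          rw [if_pos hAc, if_pos hcond, digit_sum_eq]
        rw [hst']
        obtain ⟨⟨hi1, hi2⟩, hii, hiii⟩ := ih (c, sdig c)
        rw [digit_sum_eq] at hcond
        have hstc : st.2 ≤ sdig c := by rcases hcond with h | h <;> omega
        refine ⟨⟨by simp at hi1 ⊢; omega, ?_⟩, ?_, ?_⟩
        · intro heq
          simp at hi1 hi2
          rcases hcond with h | ⟨h1, h2⟩
          · omega
          · have := hi2 (by omega)
            omega
        · intro d hd hAd
          rcases List.mem_cons.1 hd with rfl | hd'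
          · simp at hi1 hi2
            rcases lt_or_eq_of_le hi1 with h | h
            · exact Or.inl h
            · exact Or.inr ⟨h, hi2 h.symm⟩
          · exact hii d hd' hAd
        · rcases hiii with h | ⟨h1, h2, h3⟩
          · exact Or.inr ⟨by rw [h]; exact hAc, by rw [h], by rw [h]; exact List.mem_cons_self⟩
          · exact Or.inr ⟨h1, h2, List.mem_cons_of_mem _ h3⟩
      · have hst' : selStep A st c = st := by
          unfold selStep
          rw [if_pos hAc, if_neg hcond]
        rw [hst']
        obtain ⟨⟨hi1, hi2⟩, hii, hiii⟩ := ih st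
        push_neg at hcond
        rw [digit_sum_eq] at hcond
        obtain ⟨hc1, hc2⟩ := hcond
        refine ⟨⟨hi1, hi2⟩, ?_, ?_⟩
        · intro d hd hAd
          rcases List.mem_cons.1 hd with rfl | hd'
          · by_cases heq : sdig d = (cs.foldl (selStep A) st).2
            · refine Or.inr ⟨heq, ?_⟩
              have h1 : (cs.foldl (selStep A) st).2 = st.2 := by omega
              have := hi2 h1
              have := hc2 (by omega)
              omega
            · exact Or.inl (by omega)
          · exact hii d hd' hAd
        · rcases hiii with h | ⟨h1, h2, h3⟩
          · exact Or.inl h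
          · exact Or.inr ⟨h1, h2, List.mem_cons_of_mem _ h3⟩
    · have hst' : selStep A st c = st := by
        unfold selStep
        rw [if_neg hAc]
      rw [hst']
      obtain ⟨⟨hi1, hi2⟩, hii, hiii⟩ := ih st
      refine ⟨⟨hi1, hi2⟩, ?_, ?_⟩
      · intro d hd hAd
        rcases List.mem_cons.1 hd with rfl | hd'
        · exact absurd hAd hAc
        · exact hii d hd' hAd
      · rcases hiii with h | ⟨h1, h2, h3⟩
        · exact Or.inl h
        · exact Or.inr ⟨h1, h2, List.mem_cons_of_mem _ h3⟩

-- the extremal characterisation: being the least maximiser of sdig on [a,b]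
def IsBest (a b : Int) (p : Int × Int) : Prop :=
  a ≤ p.1 ∧ p.1 ≤ b ∧ p.2 = sdig p.1 ∧
  (∀ z, a ≤ z → z ≤ b → sdig z ≤ p.2) ∧
  (∀ z, a ≤ z → z < p.1 → sdig z < p.2)

theorem isBest_unique (a b : Int) (p q : Int × Int) (hp : IsBest a b p) (hq : IsBest a b q) :
    p = q := by
  obtain ⟨hp1, hp2, hp3, hp4, hp5⟩ := hp
  obtain ⟨hq1, hq2, hq3, hq4, hq5⟩ := hq
  have h1 : p.1 = q.1 := by
    rcases lt_trichotomy p.1 q.1 with h | h | h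
    · have := hq5 p.1 hp1 h
      have := hq4 p.1 hp1 hp2
      have := hp4 q.1 hq1 hq2
      omega
    · exact h
    · have := hp5 q.1 hq1 h
      have := hp4 q.1 hq1 hq2
      have := hq4 p.1 hp1 hp2
      omega
  have h2 : p.2 = q.2 := by rw [hp3, hq3, h1]
  exact Prod.ext h1 h2

theorem specD_isBest (a : Int) (ha : 0 ≤ a) : ∀ (K : Nat) (b : Int),
    (b + 1 - a).toNat ≤ K → a ≤ b → IsBest a b (specD a b) := by
  intro K
  induction K with
  | zero => intro b hK hab; omega
  | succ K ih =>
    intro b hK hab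
    rw [specD, dif_neg (by omega : ¬ b < a)]
    by_cases hab' : a ≤ b - 1
    · obtain ⟨ih1, ih2, ih3, ih4, ih5⟩ := ih (b - 1) (by omega) hab'
      show IsBest a b (if sdig b > (specD a (b - 1)).2 then (b, sdig b) else specD a (b - 1))
      by_cases hgt : sdig b > (specD a (b - 1)).2
      · rw [if_pos hgt]
        refine ⟨hab, le_refl b, rfl, ?_, ?_⟩
        · intro z hz hzb
          rcases eq_or_lt_of_le hzb with rfl | hlt
          · exact le_refl _
          · have := ih4 z hz (by omega)
            simp only []
            omega
        · intro z hz hzb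
          have := ih4 z hz (by omega)
          simp only []
          omega
      · rw [if_neg hgt]
        refine ⟨ih1, by omega, ih3, ?_, ?_⟩
        · intro z hz hzb
          rcases eq_or_lt_of_le hzb with rfl | hlt
          · omega
          · exact ih4 z hz (by omega)
        · exact ih5
    · have hab2 : a = b := by omega
      subst hab2
      have hp : specD a (a - 1) = (0, -1) := by rw [specD, dif_pos (by omega)]
      show IsBest a a (if sdig a > (specD a (a - 1)).2 then (a, sdig a) else specD a (a - 1))
      rw [hp]
      have h0 : 0 ≤ sdig a := sdig_nonneg a
      rw [if_pos (by simp; omega)]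
      refine ⟨le_refl a, le_refl a, rfl, ?_, ?_⟩
      · intro z hz hzb
        have hza : z = a := by omega
        subst hza
        exact le_refl _
      · intro z hz hzb
        simp only [] at hzb
        omega

theorem alt_isBest (a b : Int) (ha : 0 ≤ a) (hab : a ≤ b) :
    IsBest a b (encontrar_senha_alt a b) := by
  have hcl : candLoop b 1 [b] = b :: candsSpec b := by
    rw [candLoop_eq]
    simp
  have halt : encontrar_senha_alt a b = (b :: candsSpec b).foldl (selStep a) (0, -1) := by
    unfold encontrar_senha_alt
    rw [if_neg (by omega : ¬ b < a), hcl]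
  rw [halt]
  obtain ⟨⟨hi1, hi2⟩, hii, hiii⟩ := sel_spec a (b :: candsSpec b) (0, -1)
  set res := (b :: candsSpec b).foldl (selStep a) ((0 : Int), (-1 : Int)) with hres
  have hB := hii b (List.mem_cons_self) hab
  have hsB := sdig_nonneg b
  have hres2 : 0 ≤ res.2 := by rcases hB with h | h <;> omega
  have hA : a ≤ res.1 ∧ res.2 = sdig res.1 ∧ res.1 ∈ b :: candsSpec b := by
    rcases hiii with h | h
    · rw [h] at hres2; simp at hres2
    · exact h
  obtain ⟨hA1, hA2, hA3⟩ := hA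
  have hub : res.1 ≤ b := by
    rcases List.mem_cons.1 hA3 with h | h
    · omega
    · exact le_of_lt (candsSpec_bounds b _ h).2
  refine ⟨hA1, hub, hA2, ?_, ?_⟩
  · intro z hz hzb
    rcases eq_or_lt_of_le hzb with rfl | hlt
    · rcases hB with h | h <;> omega
    · obtain ⟨c, hcmem, hzc, hsd, _⟩ := cand_cover b.toNat b z (le_refl _) (by omega) hlt
      have hc := hii c (List.mem_cons_of_mem _ hcmem) (le_trans hz hzc)
      rcases hc with h | h <;> omega
  · intro z hz hzr
    have hzb : z < b := lt_of_lt_of_le hzr hub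
    by_contra hcon
    push_neg at hcon
    obtain ⟨c, hcmem, hzc, hsd, heq⟩ := cand_cover b.toNat b z (le_refl _) (by omega) hzb
    have hc := hii c (List.mem_cons_of_mem _ hcmem) (le_trans hz hzc)
    have h1 : sdig c = res.2 := by rcases hc with h | h <;> omega
    have h2 : sdig z = sdig c := by omega
    have hzc' := heq h2
    rcases hc with h | ⟨_, hle⟩
    · omega
    · omega

-- ===== VERDICT (by name: the statement is the Claim_ definition above) =====
theorem encontrar_senha_spec : Claim_equal_encontrar_senha := by
  intro A B _ hpre
  unfold Spec_encontrar_senha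
  by_cases hab : B < A
  · unfold encontrar_senha encontrar_senha_alt
    rw [if_pos hab, PySem.List.pyRange_one_eq_nil (by omega)]
    simp
  · have hA : 0 ≤ A := by rcases hpre with h | h; exact h; omega
    have hA' : A ≤ B := by omega
    have h1 : encontrar_senha A B = specD A B := by
      unfold encontrar_senha
      rw [fold_eq_specD A hA B]
    rw [h1]
    exact isBest_unique A B _ _
      (specD_isBest A hA (B + 1 - A).toNat B (le_refl _) hA')
      (alt_isBest A B hA hA')
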